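-- pv_equiv track=rewrite | github.com/Steven9408/Algorithm_Study | Programers/temp/풍선3.py | solution
-- ===== SOURCE A (Python) =====
-- def solution(a):
--     N = len(a)
--     res = 0
--
--     for i in range(N):
--         b_cnt = 0
--         k = 0
--         for j in range(0,i):
--             if a[i] < a[j]:
--                 b_cnt += 1
--             k += 1
--         if k == b_cnt:
--             res += 1
--             continue
--         b_cnt = 0
--         k = 0
--         for j in range(i+1,N):
--             if a[i] < a[j]:
--                 b_cnt += 1
--             k += 1
--         if k == b_cnt:
--             res += 1
--             continue
--
--
--
--     return res
-- ===== SOURCE B (Python) =====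
-- def solution(a):
--     # O(N): pair each element with the min of its right suffix, scan with a running prefix min.
--     sufs = []
--     m = None
--     for x in reversed(a):
--         sufs.append(m)
--         m = x if m is None else min(m, x)
--     sufs.reverse()
--     res = 0
--     p = None
--     for x, s in zip(a, sufs):
--         if (p is None or x < p) or (s is None or x < s):
--             res += 1
--         p = x if p is None else min(p, x)
--     return res
-- ===== Notes on version B (the rewrite author's own statement) =====
-- stated objective: faster
-- what changed: Replaced the per-index O(N) rescans of the left and right parts by a precomputed suffix-min list plus a running prefix min, checking each element in O(1).
import Mathlib
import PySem

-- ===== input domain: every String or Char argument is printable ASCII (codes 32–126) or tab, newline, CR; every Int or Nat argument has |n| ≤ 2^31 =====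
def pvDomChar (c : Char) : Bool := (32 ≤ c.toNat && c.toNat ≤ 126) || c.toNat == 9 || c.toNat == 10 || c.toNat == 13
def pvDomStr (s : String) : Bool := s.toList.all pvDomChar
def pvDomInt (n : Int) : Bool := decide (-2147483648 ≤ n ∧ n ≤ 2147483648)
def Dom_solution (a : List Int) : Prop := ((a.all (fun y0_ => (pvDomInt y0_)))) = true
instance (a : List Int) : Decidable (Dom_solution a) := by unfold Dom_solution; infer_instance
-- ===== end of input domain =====

-- B replaces A's quadratic left/right rescans by a suffix-min list and a running prefix min (objective: faster, O(n) vs O(n^2)).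

-- ===== PORT A =====
def solution (a : List Int) : Int :=
  let N : Int := (a.length : Int)
  (PySem.List.pyRange 0 N 1).foldl (fun res i =>
    let s1 := (PySem.List.pyRange 0 i 1).foldl
      (fun (bk : Int × Int) j =>
        ((if PySem.List.pyGetD a i 0 < PySem.List.pyGetD a j 0 then bk.1 + 1 else bk.1), bk.2 + 1))
      (0, 0)
    if s1.2 == s1.1 then res + 1
    else
      let s2 := (PySem.List.pyRange (i + 1) N 1).foldl
        (fun (bk : Int × Int) j =>
          ((if PySem.List.pyGetD a i 0 < PySem.List.pyGetD a j 0 then bk.1 + 1 else bk.1), bk.2 + 1))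
        (0, 0)
      if s2.2 == s2.1 then res + 1 else res) 0

-- ===== PORT B =====
def solution_alt (a : List Int) : Int :=
  let built := a.reverse.foldl
    (fun (st : List (Option Int) × Option Int) x =>
      (st.1 ++ [st.2], some (match st.2 with | none => x | some m => min m x)))
    ([], none)
  let sufs := built.1.reverse
  ((a.zip sufs).foldl
    (fun (st : Int × Option Int) xs =>
      ((if (match st.2 with | none => true | some p => decide (xs.1 < p)) ||
           (match xs.2 with | none => true | some m => decide (xs.1 < m)) then st.1 + 1 else st.1),
       some (match st.2 with | none => xs.1 | some p => min p xs.1)))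
    (0, none)).1

-- ===== PRECONDITION & SPEC =====
def Spec_solution (a : List Int) (out : Int) : Prop := out = solution_alt a
instance (a : List Int) (out : Int) : Decidable (Spec_solution a out) := by unfold Spec_solution; infer_instance

-- ===== CLAIM (what is proved, stated in full; the proofs are below) =====
def Claim_equal_solution : Prop := ∀ (a : List Int), Dom_solution a → Spec_solution a (solution a)

-- ===== LEMMAS AND PROOFS =====

-- helper definitions used only by the proofs

-- running min as A's python's `min` fold produces it (fold over the reversed list)
def pvM : List Int → Option Int
  | [] => none
  | x :: xs => some (match pvM xs with | none => x | some m => min m x)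

-- the suffix list as built (before the final reverse)
def pvS : List Int → List (Option Int)
  | [] => []
  | _ :: xs => pvS xs ++ [pvM xs]

-- the suffix list after the reverse: element-wise min of the tail
def pvSuf : List Int → List (Option Int)
  | [] => []
  | _ :: xs => pvM xs :: pvSuf xs

def pvLt (x : Int) : Option Int → Bool
  | none => true
  | some m => decide (x < m)

-- common reference function: count, threading the (reversed) prefix
def pvH : List Int → List Int → Int
  | _, [] => 0
  | pre, x :: xs =>
      (if pre.all (fun y => decide (x < y)) || xs.all (fun y => decide (x < y)) then 1 else 0)
        + pvH (x :: pre) xs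

-- same with the prefix abstracted to its min
def pvHp : Option Int → List Int → Int
  | _, [] => 0
  | p, x :: xs =>
      (if pvLt x p || pvLt x (pvM xs) then 1 else 0)
        + pvHp (some (match p with | none => x | some v => min v x)) xs

lemma pvM_eq_none {l : List Int} : pvM l = none ↔ l = [] := by
  cases l <;> simp [pvM]

lemma pvLt_pvM (x : Int) (l : List Int) :
    pvLt x (pvM l) = l.all (fun y => decide (x < y)) := by
  induction l with
  | nil => rfl
  | cons y ys ih =>
    cases h : pvM ys with
    | none =>
      have : ys = [] := pvM_eq_none.mp h
      subst this; simp [pvM, pvLt]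
    | some v =>
      simp only [pvM, h, pvLt, List.all_cons]
      rw [← ih, h]
      simp [pvLt, Bool.and_comm]

lemma pvHp_pvH : ∀ (l pre : List Int), pvHp (pvM pre) l = pvH pre l := by
  intro l
  induction l with
  | nil => intro pre; rfl
  | cons x xs ih =>
    intro pre
    have h2 : pvHp (some (match pvM pre with | none => x | some v => min v x)) xs
        = pvHp (pvM (x :: pre)) xs := by rfl
    simp only [pvHp, pvH, h2, ih, pvLt_pvM]
    split_ifs <;> push_cast <;> ring

-- B side: the build fold
lemma pv_build_eq (a : List Int) :
    a.reverse.foldl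
      (fun (st : List (Option Int) × Option Int) x =>
        (st.1 ++ [st.2], some (match st.2 with | none => x | some m => min m x)))
      ([], none) = (pvS a, pvM a) := by
  induction a with
  | nil => rfl
  | cons x xs ih => simp [List.reverse_cons, List.foldl_append, ih, pvS, pvM]

lemma pvS_reverse (a : List Int) : (pvS a).reverse = pvSuf a := by
  induction a with
  | nil => rfl
  | cons x xs ih => simp [pvS, pvSuf, ih]

lemma pv_zipfold : ∀ (l : List Int) (res : Int) (p : Option Int),
    ((l.zip (pvSuf l)).foldl
      (fun (st : Int × Option Int) xs =>
        ((if (match st.2 with | none => true | some p => decide (xs.1 < p)) ||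
             (match xs.2 with | none => true | some m => decide (xs.1 < m)) then st.1 + 1 else st.1),
         some (match st.2 with | none => xs.1 | some p => min p xs.1)))
      (res, p)).1 = res + pvHp p l := by
  intro l
  induction l with
  | nil => intro res p; simp [pvSuf, pvHp]
  | cons x xs ih =>
    intro res p
    simp only [pvSuf, List.zip_cons_cons, List.foldl_cons, ih, pvHp, pvLt]
    cases p <;> simp <;> ring_nf <;> split_ifs <;> ring

lemma pv_alt_eq (a : List Int) : solution_alt a = pvH [] a := by
  show ((a.zip ((a.reverse.foldl
      (fun (st : List (Option Int) × Option Int) x =>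
        (st.1 ++ [st.2], some (match st.2 with | none => x | some m => min m x)))
      ([], none)).1.reverse)).foldl _ (0, none)).1 = pvH [] a
  rw [pv_build_eq, pvS_reverse, pv_zipfold]
  have : (none : Option Int) = pvM [] := rfl
  rw [this, pvHp_pvH]
  simp

-- A side: the inner counting fold
lemma pv_pairfold (x : Int) : ∀ (l : List Int) (b k : Int),
    l.foldl (fun (bk : Int × Int) (y : Int) =>
      ((if x < y then bk.1 + 1 else bk.1), bk.2 + 1)) (b, k)
      = (b + (l.countP (fun y => decide (x < y)) : Int), k + (l.length : Int)) := by
  intro l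
  induction l with
  | nil => intro b k; simp
  | cons y ys ih =>
    intro b k
    simp only [List.foldl_cons, ih, List.countP_cons, List.length_cons]
    by_cases h : x < y <;>
      simp only [h, decide_true, decide_false, if_true, if_false, Prod.ext_iff] <;>
      constructor <;> push_cast <;> ring

-- 'k == b_cnt' of a counting scan is exactly 'all'
lemma pv_count_all (x : Int) (l : List Int) :
    (((l.length : Int) == (l.countP (fun y => decide (x < y)) : Int))
      = l.all (fun y => decide (x < y))) := by
  by_cases h : l.all (fun y => decide (x < y)) = true
  · have hc : l.countP (fun y => decide (x < y)) = l.length :=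
      List.countP_eq_length.mpr (List.all_eq_true.mp h)
    simp [h, hc]
  · simp only [h]
    rw [Bool.beq_eq_decide_eq]
    simp only [decide_eq_false_iff_not]
    intro hcontra
    exact h (List.all_eq_true.mpr (List.countP_eq_length.mp (by exact_mod_cast hcontra.symm)))

-- characterisation of A as a countP over indices
lemma pv_A_eq (a : List Int) :
    solution a = ((List.range a.length).countP (fun k =>
      (a.take k).all (fun y => decide (a.getD k 0 < y)) ||
      (a.drop (k + 1)).all (fun y => decide (a.getD k 0 < y))) : Nat) := by
  simp only [solution]
  rw [PySem.List.foldl_congr_mem _ _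
      (fun (res i : Int) =>
        if ((a.take i.toNat).all (fun y => decide (PySem.List.pyGetD a i 0 < y)) ||
            (a.drop (i + 1).toNat).all (fun y => decide (PySem.List.pyGetD a i 0 < y)))
        then res + 1 else res) 0 ?_]
  · rw [PySem.List.pyRange_zero_nat, List.foldl_map, PySem.List.foldl_count_if]
    simp only [zero_add, Nat.cast_inj]
    apply List.countP_congr
    intro k _
    simp [PySem.List.pyGetD_natCast]
  · intro res i hi
    rw [PySem.List.mem_pyRange_one] at hi
    obtain ⟨hi0, hi1⟩ := hi
    have hilen : i.toNat ≤ a.length := by omega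
    have ht : (a.take i.toNat).length = i.toNat := by simp [List.length_take]; omega
    -- left scan = count over the prefix
    have e1 : PySem.List.pyRange 0 i 1 = PySem.List.pyRange 0 ((a.take i.toNat).length : Int) 1 := by
      rw [ht]; congr 1; omega
    have e2 : (PySem.List.pyRange 0 i 1).foldl
        (fun (bk : Int × Int) j =>
          ((if PySem.List.pyGetD a i 0 < PySem.List.pyGetD a j 0 then bk.1 + 1 else bk.1), bk.2 + 1))
        (0, 0)
        = (((a.take i.toNat).countP (fun y => decide (PySem.List.pyGetD a i 0 < y)) : Int),
           ((a.take i.toNat).length : Int)) := by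
      rw [e1, PySem.List.foldl_congr_mem _ _
          (fun (bk : Int × Int) j =>
            ((if PySem.List.pyGetD a i 0 < PySem.List.pyGetD (a.take i.toNat) j 0 then bk.1 + 1 else bk.1),
             bk.2 + 1)) (0, 0) ?_]
      · rw [PySem.List.foldl_pyRange_pyGetD' (a.take i.toNat) 0
            (fun (bk : Int × Int) (y : Int) =>
              ((if PySem.List.pyGetD a i 0 < y then bk.1 + 1 else bk.1), bk.2 + 1)) (0, 0) le_rfl]
        simp only [Int.toNat_zero, List.drop_zero, pv_pairfold, zero_add]
      · intro bk j hj
        rw [PySem.List.mem_pyRange_one] at hj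
        obtain ⟨hj0, hj1⟩ := hj
        rw [ht] at hj1
        have hj1' : j < (a.length : Int) := by omega
        dsimp only
        rw [PySem.List.pyGetD_eq_getElem a 0 hj0 hj1',
            PySem.List.pyGetD_eq_getElem (a.take i.toNat) 0 hj0 (by rw [ht]; omega),
            List.getElem_take]
    -- right scan = count over the suffix
    have e3 : (PySem.List.pyRange (i + 1) ((a.length : Int)) 1).foldl
        (fun (bk : Int × Int) j =>
          ((if PySem.List.pyGetD a i 0 < PySem.List.pyGetD a j 0 then bk.1 + 1 else bk.1), bk.2 + 1))
        (0, 0)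
        = (((a.drop (i + 1).toNat).countP (fun y => decide (PySem.List.pyGetD a i 0 < y)) : Int),
           ((a.drop (i + 1).toNat).length : Int)) := by
      rw [PySem.List.foldl_pyRange_pyGetD' a 0
          (fun (bk : Int × Int) (y : Int) =>
            ((if PySem.List.pyGetD a i 0 < y then bk.1 + 1 else bk.1), bk.2 + 1)) (0, 0)
          (by omega : (0:Int) ≤ i + 1)]
      simp only [pv_pairfold, zero_add]
    simp only [e2, e3, pv_count_all]
    by_cases h1 : (a.take i.toNat).all (fun y => decide (PySem.List.pyGetD a i 0 < y)) <;>
      by_cases h2 : (a.drop (i + 1).toNat).all (fun y => decide (PySem.List.pyGetD a i 0 < y)) <;>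
        simp [h1, h2]

-- countP over indices equals pvH
lemma pv_count_H : ∀ (xs pre : List Int),
    (((List.range xs.length).countP (fun k =>
      (pre.all (fun y => decide (xs.getD k 0 < y)) &&
        (xs.take k).all (fun y => decide (xs.getD k 0 < y))) ||
      (xs.drop (k + 1)).all (fun y => decide (xs.getD k 0 < y))) : Nat) : Int) = pvH pre xs := by
  intro xs
  induction xs with
  | nil => intro pre; simp [pvH]
  | cons x xs ih =>
    intro pre
    rw [List.length_cons, List.range_succ_eq_map, List.countP_cons, List.countP_map]
    have h1 : ((fun k => (pre.all (fun y => decide ((x :: xs).getD k 0 < y)) &&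
        ((x :: xs).take k).all (fun y => decide ((x :: xs).getD k 0 < y))) ||
      ((x :: xs).drop (k + 1)).all (fun y => decide ((x :: xs).getD k 0 < y))) ∘ Nat.succ)
        = (fun k => ((x :: pre).all (fun y => decide (xs.getD k 0 < y)) &&
        (xs.take k).all (fun y => decide (xs.getD k 0 < y))) ||
      (xs.drop (k + 1)).all (fun y => decide (xs.getD k 0 < y))) := by
      funext k
      simp only [Function.comp, List.getD_cons_succ, List.take_succ_cons, List.drop_succ_cons,
        List.all_cons]
      cases pre.all (fun y => decide (xs.getD k 0 < y)) <;>
        cases (decide (xs.getD k 0 < x)) <;> simp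
    rw [h1]
    push_cast [apply_ite (fun (n : Nat) => (n : Int))]
    rw [ih (x :: pre)]
    simp only [List.getD_cons_zero, List.take_zero, List.all_nil, Bool.and_true,
      List.drop_one, List.tail_cons, pvH]
    split_ifs <;> ring


-- ===== VERDICT (by name: the statement is the Claim_ definition above) =====
theorem solution_spec : Claim_equal_solution := by
  intro a _
  unfold Spec_solution
  rw [pv_A_eq, pv_alt_eq, ← pv_count_H a []]
  simp
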